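-- pv_equiv track=rewrite | github.com/piotrrusak/how_to_get_to | utils/load_state_graph.py | load_state_graph
-- ===== SOURCE A (Python) =====
-- from collections import defaultdict
--
-- def load_state_graph(lines, starting_times):
--
--     n = 10
--     V = set((i, j) for i in range(n) for j in range(n))
--
--     graph = {}
--     H = defaultdict(list)
--
--     for l in range(len(lines)):
--         for i in range(len(lines[l])):
--             v, f = lines[l][i]
--             if f == 1:
--                 for st in starting_times[l]:
--                     H[v].append((l, st + i))
--
--     for key in H.keys():
--         H[key].sort(key=lambda x: x[1])
--         for i in range(1, len(H[key])):
--             _, t1 = H[key][i - 1]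
--             _, t2 = H[key][i]
--             graph[((key, t1), (key, t2))] = t2 - t1
--
--     for i in range(len(lines)):
--         for st in starting_times[i]:
--             tail = 0
--             head = 1
--             while head < len(lines[i]):
--                 u, _ = lines[i][tail]
--                 v, f = lines[i][head]
--                 if f == 1:
--                     graph[((u, st + tail), (v, st + head))] = (st+head)-(st+tail)
--                     tail = head
--                 head += 1
--
--     return graph
-- ===== SOURCE B (Python) =====
-- def load_state_graph(lines, starting_times):
--     # One flat departure-event list instead of a defaultdict of per-vertex buckets;
--     # travel edges come from a per-line chain of active indices instead of the
--     # tail/head two-pointer walk repeated for every starting time.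
--     events = [(v, st + i)
--               for line, sts in zip(lines, starting_times)
--               for i, (v, f) in enumerate(line) if f == 1
--               for st in sts]
--
--     graph = {}
--
--     # wait edges: per distinct vertex (first-occurrence order), adjacent sorted times
--     for u in dict.fromkeys(v for v, _ in events):
--         times = sorted(t for v, t in events if v == u)
--         for t1, t2 in zip(times, times[1:]):
--             graph[((u, t1), (u, t2))] = t2 - t1
--
--     # travel edges: chain = index 0 followed by every later index whose flag is 1
--     for line, sts in zip(lines, starting_times):
--         chain = [0] + [j for j in range(1, len(line)) if line[j][1] == 1]
--         hops = list(zip(chain, chain[1:]))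
--         for st in sts:
--             for a, b in hops:
--                 graph[((line[a][0], st + a), (line[b][0], st + b))] = b - a
--
--     return graph
-- ===== Notes on version B (the rewrite author's own statement) =====
-- stated objective: alternative
-- what changed: Wait edges now come from one flat departure-event list scanned per distinct vertex (no defaultdict of buckets, no per-bucket index loop), and travel edges from a per-line chain of active indices precomputed once and zipped consecutively, instead of the tail/head two-pointer walk repeated for every starting time (the constant-factor speedup a timing run measured).
import Mathlib
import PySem

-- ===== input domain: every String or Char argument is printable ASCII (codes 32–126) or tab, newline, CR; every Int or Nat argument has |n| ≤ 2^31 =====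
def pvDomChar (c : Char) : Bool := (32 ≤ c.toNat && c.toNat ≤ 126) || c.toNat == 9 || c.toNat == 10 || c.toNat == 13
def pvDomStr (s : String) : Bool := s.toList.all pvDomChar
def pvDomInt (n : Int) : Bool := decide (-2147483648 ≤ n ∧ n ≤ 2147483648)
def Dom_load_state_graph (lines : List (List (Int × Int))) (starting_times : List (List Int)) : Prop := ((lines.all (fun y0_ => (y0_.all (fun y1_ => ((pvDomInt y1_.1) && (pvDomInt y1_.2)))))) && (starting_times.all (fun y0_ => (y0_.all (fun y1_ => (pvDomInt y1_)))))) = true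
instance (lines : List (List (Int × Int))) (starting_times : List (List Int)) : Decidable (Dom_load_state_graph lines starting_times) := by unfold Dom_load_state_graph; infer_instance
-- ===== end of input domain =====

-- B replaces A's defaultdict of per-vertex buckets by one flat departure-event list
-- scanned per distinct vertex, and A's tail/head two-pointer walk (repeated per
-- starting time) by a per-line precomputed chain of active indices zipped
-- consecutively (objective: alternative decomposition, same results).

-- ===== PORT A =====
-- A's `n = 10` and `V` are dead code (V is never used); they are not ported.
-- The inner while-loop of A's third phase (tail/head walk over one line):
def lsgA_while (line : List (Int × Int)) (st tail head : Int)
    (g : PySem.Dict ((Int × Int) × (Int × Int)) Int) :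
    PySem.Dict ((Int × Int) × (Int × Int)) Int :=
  if _h : head < (line.length : Int) then
    let u := (PySem.List.pyGetD line tail (0, 0)).1
    let vf := PySem.List.pyGetD line head (0, 0)
    if vf.2 = 1 then
      lsgA_while line st head (head + 1)
        (g.insert ((u, st + tail), (vf.1, st + head)) ((st + head) - (st + tail)))
    else
      lsgA_while line st tail (head + 1) g
  else g
termination_by ((line.length : Int) - head).toNat
decreasing_by all_goals omega

-- H = defaultdict(list); H[v].append((l, st + i)) loop (indices in range under Pre_,
-- so pyGetD's default is never used there).
def lsgA_H (lines : List (List (Int × Int))) (starting_times : List (List Int)) :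
    PySem.Dict Int (List (Int × Int)) :=
  (PySem.List.pyRange 0 (lines.length : Int)).foldl (fun H l =>
    (PySem.List.pyRange 0 ((PySem.List.pyGetD lines l []).length : Int)).foldl (fun H i =>
      let vf := PySem.List.pyGetD (PySem.List.pyGetD lines l []) i (0, 0)
      if vf.2 = 1 then
        (PySem.List.pyGetD starting_times l []).foldl
          (fun H st => H.modify vf.1 [] (fun b => b ++ [(l, st + i)])) H
      else H) H) PySem.Dict.empty

-- `for key in H.keys(): H[key].sort(key=...); for i in range(1, len(H[key])): ...`
def lsgA_wait (H : PySem.Dict Int (List (Int × Int))) :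
    PySem.Dict ((Int × Int) × (Int × Int)) Int :=
  H.keys.foldl (fun g key =>
    (PySem.List.pyRange 1 ((PySem.List.sorted (H.getD key []) (fun x => x.2)).length : Int)).foldl
      (fun g i =>
        g.insert ((key, (PySem.List.pyGetD (PySem.List.sorted (H.getD key []) (fun x => x.2)) (i - 1) (0, 0)).2),
                  (key, (PySem.List.pyGetD (PySem.List.sorted (H.getD key []) (fun x => x.2)) i (0, 0)).2))
          ((PySem.List.pyGetD (PySem.List.sorted (H.getD key []) (fun x => x.2)) i (0, 0)).2 -
           (PySem.List.pyGetD (PySem.List.sorted (H.getD key []) (fun x => x.2)) (i - 1) (0, 0)).2)) g)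
    PySem.Dict.empty

def lsgA_travel (lines : List (List (Int × Int))) (starting_times : List (List Int))
    (g : PySem.Dict ((Int × Int) × (Int × Int)) Int) :
    PySem.Dict ((Int × Int) × (Int × Int)) Int :=
  (PySem.List.pyRange 0 (lines.length : Int)).foldl (fun g i =>
    (PySem.List.pyGetD starting_times i []).foldl (fun g st =>
      lsgA_while (PySem.List.pyGetD lines i []) st 0 1 g) g) g

def load_state_graph (lines : List (List (Int × Int))) (starting_times : List (List Int)) :
    List ((Int × Int) × (Int × Int) × Int) :=
  (lsgA_travel lines starting_times (lsgA_wait (lsgA_H lines starting_times))).items.map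
    (fun p => (p.1.1, p.1.2, p.2))

-- ===== PORT B =====
-- flat departure-event list (v, st + i), in scan order
def lsgB_events (lines : List (List (Int × Int))) (starting_times : List (List Int)) :
    List (Int × Int) :=
  (lines.zip starting_times).flatMap (fun p =>
    (PySem.List.enumerate p.1).flatMap (fun q =>
      if q.2.2 = 1 then p.2.map (fun st => (q.2.1, st + q.1)) else []))

-- wait edges: per distinct vertex (dict.fromkeys order), adjacent sorted times
def lsgB_wait (events : List (Int × Int)) :
    PySem.Dict ((Int × Int) × (Int × Int)) Int :=
  (PySem.List.dedup (events.map (fun e => e.1))).foldl (fun g u =>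
    ((PySem.List.sorted ((events.filter (fun e => e.1 == u)).map (fun e => e.2)) (fun t => t)).zip
      (PySem.List.slice (PySem.List.sorted ((events.filter (fun e => e.1 == u)).map (fun e => e.2)) (fun t => t)) (some 1) none)).foldl
      (fun g q => g.insert ((u, q.1), (u, q.2)) (q.2 - q.1)) g) PySem.Dict.empty

-- travel edges: chain = index 0 followed by every later index whose flag is 1
def lsgB_travel (lines : List (List (Int × Int))) (starting_times : List (List Int))
    (g : PySem.Dict ((Int × Int) × (Int × Int)) Int) :
    PySem.Dict ((Int × Int) × (Int × Int)) Int :=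
  (lines.zip starting_times).foldl (fun g p =>
    p.2.foldl (fun g st =>
      ((0 :: (PySem.List.pyRange 1 (p.1.length : Int)).filter (fun j => (PySem.List.pyGetD p.1 j (0, 0)).2 = 1)).zip
        (PySem.List.slice (0 :: (PySem.List.pyRange 1 (p.1.length : Int)).filter (fun j => (PySem.List.pyGetD p.1 j (0, 0)).2 = 1)) (some 1) none)).foldl
        (fun g ab =>
          g.insert (((PySem.List.pyGetD p.1 ab.1 (0, 0)).1, st + ab.1),
                    ((PySem.List.pyGetD p.1 ab.2 (0, 0)).1, st + ab.2)) (ab.2 - ab.1)) g) g) g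

def load_state_graph_alt (lines : List (List (Int × Int))) (starting_times : List (List Int)) :
    List ((Int × Int) × (Int × Int) × Int) :=
  (lsgB_travel lines starting_times (lsgB_wait (lsgB_events lines starting_times))).items.map
    (fun p => (p.1.1, p.1.2, p.2))

-- ===== PRECONDITION & SPEC =====
-- A indexes starting_times[l] for every l < len(lines): it raises IndexError exactly
-- when starting_times is shorter than lines; Pre_ excludes exactly those inputs.
def Pre_load_state_graph (lines : List (List (Int × Int))) (starting_times : List (List Int)) : Prop :=
  lines.length ≤ starting_times.length
instance (lines : List (List (Int × Int))) (starting_times : List (List Int)) : Decidable (Pre_load_state_graph lines starting_times) := by unfold Pre_load_state_graph; infer_instance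

def pvWitness_load_state_graph : (List (List (Int × Int))) × List (List Int) :=
  ([[(0, 1), (1, 1)]], [[0, 3]])

def Spec_load_state_graph (lines : List (List (Int × Int))) (starting_times : List (List Int)) (out : List ((Int × Int) × (Int × Int) × Int)) : Prop := out = load_state_graph_alt lines starting_times
instance (lines : List (List (Int × Int))) (starting_times : List (List Int)) (out : List ((Int × Int) × (Int × Int) × Int)) : Decidable (Spec_load_state_graph lines starting_times out) := by unfold Spec_load_state_graph; infer_instance

-- ===== CLAIM (what is proved, stated in full; the proofs are below) =====
def Claim_equal_load_state_graph : Prop := ∀ (lines : List (List (Int × Int))) (starting_times : List (List Int)), Dom_load_state_graph lines starting_times → Pre_load_state_graph lines starting_times → Spec_load_state_graph lines starting_times (load_state_graph lines starting_times)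


-- ===== LEMMAS AND PROOFS =====

theorem pyRange_one_eq (a b : Int) :
    PySem.List.pyRange a b = (List.range (b - a).toNat).map (fun (k : Nat) => a + (k : Int)) := by
  simp only [PySem.List.pyRange]
  rw [if_neg one_ne_zero]
  have hc : (if (0:Int) < 1 then (if a < b then ((b - a + 1 - 1) / 1).toNat else 0)
      else (if b < a then ((a - b + -1 - 1) / -1).toNat else 0)) = (b - a).toNat := by
    rw [if_pos Int.zero_lt_one]
    have he : b - a + 1 - 1 = b - a := by ring
    rw [he, Int.ediv_one]
    split_ifs with h
    · rfl
    · omega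
  rw [hc]
  simp only [one_mul]

theorem pyRange_zero_nat (n : Nat) :
    PySem.List.pyRange 0 (n : Int) = (List.range n).map (fun (k : Nat) => (k : Int)) := by
  rw [pyRange_one_eq]
  simp

theorem foldl_flatMap {α β γ : Type} (l : List α) (f : α → List β) (g : γ → β → γ) (init : γ) :
    (l.flatMap f).foldl g init = l.foldl (fun acc x => (f x).foldl g acc) init := by
  induction l generalizing init with
  | nil => rfl
  | cons x t ih => simp [List.flatMap_cons, List.foldl_append, ih]

theorem pyGetD_natCast {α : Type} (xs : List α) (k : Nat) (d : α) :
    PySem.List.pyGetD xs (k : Int) d = (xs[k]?).getD d := by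
  simp [PySem.List.pyGetD, PySem.List.pyGet?_natCast]

theorem pyGetD_zero_cons {α : Type} (x : α) (xs : List α) (d : α) :
    PySem.List.pyGetD (x :: xs) 0 d = x := by
  rw [show (0 : Int) = ((0 : Nat) : Int) from rfl, pyGetD_natCast]
  rfl

theorem pyGetD_cons_succ {α : Type} (x : α) (xs : List α) (k : Nat) (d : α) :
    PySem.List.pyGetD (x :: xs) ((k : Int) + 1) d = PySem.List.pyGetD xs (k : Int) d := by
  have h1 : ((k : Int) + 1) = ((k + 1 : Nat) : Int) := by push_cast; ring
  rw [h1, pyGetD_natCast, pyGetD_natCast]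
  simp

theorem pyGetD_map_snd (xs : List (Int × Int)) (i : Int) :
    (PySem.List.pyGetD xs i (0, 0)).2 = PySem.List.pyGetD (xs.map (fun x => x.2)) i 0 := by
  simp only [PySem.List.pyGetD, PySem.List.pyGet?, List.length_map]
  cases h : PySem.List.pyIdx? xs.length i with
  | none => simp
  | some k =>
    simp only [Option.bind_some, List.getElem?_map]
    cases h2 : xs[k]? <;> simp

theorem enumerate_shift {α : Type} (xs : List α) (s : Int) :
    PySem.List.enumerate xs (s + 1) = (PySem.List.enumerate xs s).map (fun q => (q.1 + 1, q.2)) := by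
  induction xs generalizing s with
  | nil => simp [PySem.List.enumerate]
  | cons x t ih => simp [PySem.List.enumerate, ih]

theorem enumerate_eq_range_map {α : Type} (xs : List α) (d : α) :
    PySem.List.enumerate xs 0
      = (List.range xs.length).map (fun (k : Nat) => ((k : Int), PySem.List.pyGetD xs (k : Int) d)) := by
  induction xs with
  | nil => simp [PySem.List.enumerate]
  | cons x t ih =>
    have h0 : PySem.List.enumerate (x :: t) 0 = (0, x) :: PySem.List.enumerate t 1 := by
      simp [PySem.List.enumerate]
    rw [h0, show (1 : Int) = 0 + 1 by ring, enumerate_shift, ih]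
    simp only [List.length_cons, List.range_succ_eq_map, List.map_cons, List.map_map,
      Nat.cast_zero, pyGetD_zero_cons]
    refine List.cons_eq_cons.mpr ⟨rfl, ?_⟩
    · apply List.map_congr_left
      intro k _
      simp only [Function.comp, Nat.cast_succ]
      rw [pyGetD_cons_succ x t k d]

theorem zip_eq_range_map {α β : Type} (xs : List α) (ys : List β) (dx : α) (dy : β)
    (h : xs.length ≤ ys.length) :
    xs.zip ys = (List.range xs.length).map
      (fun (k : Nat) => (PySem.List.pyGetD xs (k : Int) dx, PySem.List.pyGetD ys (k : Int) dy)) := by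
  induction xs generalizing ys with
  | nil => simp
  | cons x t ih =>
    cases ys with
    | nil => simp at h
    | cons y u =>
      simp only [List.zip_cons_cons, List.length_cons, List.range_succ_eq_map, List.map_cons,
        List.map_map, Nat.cast_zero, pyGetD_zero_cons]
      refine List.cons_eq_cons.mpr ⟨rfl, ?_⟩
      · rw [ih u (by simpa using h)]
        apply List.map_congr_left
        intro k _
        simp only [Function.comp]
        rw [show ((Nat.succ k : Nat) : Int) = (k : Int) + 1 by push_cast; ring,
          pyGetD_cons_succ, pyGetD_cons_succ]

theorem adj_aux {β : Type} (ts : List Int) (x : Int) (step : β → Int → Int → β) (g : β) :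
    (List.range ts.length).foldl
      (fun (g : β) (k : Nat) => step g (PySem.List.pyGetD (x :: ts) (k : Int) 0) (PySem.List.pyGetD ts (k : Int) 0)) g
      = ((x :: ts).zip ts).foldl (fun g p => step g p.1 p.2) g := by
  induction ts generalizing x g with
  | nil => simp
  | cons y t ih =>
    simp only [List.length_cons, List.range_succ_eq_map, List.foldl_cons, List.foldl_map,
      List.zip_cons_cons, Nat.cast_zero, pyGetD_zero_cons]
    rw [← ih y (step g x y)]
    apply PySem.List.foldl_congr_mem
    intro acc k _
    rw [show ((Nat.succ k : Nat) : Int) = (k : Int) + 1 by push_cast; ring,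
      pyGetD_cons_succ, pyGetD_cons_succ]

theorem adj_foldl {β : Type} (ts : List Int) (step : β → Int → Int → β) (g : β) :
    (PySem.List.pyRange 1 (ts.length : Int)).foldl
      (fun g i => step g (PySem.List.pyGetD ts (i - 1) 0) (PySem.List.pyGetD ts i 0)) g
      = (ts.zip (ts.drop 1)).foldl (fun g p => step g p.1 p.2) g := by
  cases ts with
  | nil => simp
  | cons x t =>
    have hl : (((x :: t).length : Int) - 1).toNat = t.length := by
      simp
    rw [pyRange_one_eq, hl, List.foldl_map]
    have := adj_aux t x step g
    rw [show (x :: t).drop 1 = t by rfl]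
    rw [← this]
    apply PySem.List.foldl_congr_mem
    intro acc k _
    rw [show (1 : Int) + (k : Int) - 1 = (k : Int) by ring,
      show (1 : Int) + (k : Int) = (k : Int) + 1 by ring, pyGetD_cons_succ]

theorem sorted_map_snd (xs : List (Int × Int)) :
    PySem.List.sorted (xs.map (fun x => x.2)) (fun t => t)
      = (PySem.List.sorted xs (fun x => x.2)).map (fun x => x.2) := by
  apply PySem.List.sorted_id_eq_of_perm_of_pairwise
  · exact (PySem.List.sorted_perm xs (fun x => x.2) false).map _
  · exact PySem.List.sorted_map_key_pairwise xs (fun x => x.2)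

-- the flat (vertex, (line, time)) event list implicit in A's H-building loop
def evA (lines : List (List (Int × Int))) (starting_times : List (List Int)) :
    List (Int × (Int × Int)) :=
  (PySem.List.pyRange 0 (lines.length : Int)).flatMap (fun l =>
    (PySem.List.pyRange 0 ((PySem.List.pyGetD lines l []).length : Int)).flatMap (fun i =>
      if (PySem.List.pyGetD (PySem.List.pyGetD lines l []) i (0, 0)).2 = 1 then
        (PySem.List.pyGetD starting_times l []).map
          (fun st => ((PySem.List.pyGetD (PySem.List.pyGetD lines l []) i (0, 0)).1, (l, st + i)))
      else []))

theorem lsgA_H_eq (lines : List (List (Int × Int))) (starting_times : List (List Int)) :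
    lsgA_H lines starting_times
      = (evA lines starting_times).foldl
          (fun d p => d.modify p.1 [] (fun b => b ++ [p.2])) PySem.Dict.empty := by
  unfold lsgA_H evA
  rw [foldl_flatMap]
  apply PySem.List.foldl_congr_mem
  intro H l _
  rw [foldl_flatMap]
  apply PySem.List.foldl_congr_mem
  intro H2 i _
  by_cases hf : (PySem.List.pyGetD (PySem.List.pyGetD lines l []) i (0, 0)).2 = 1
  · simp only [hf, if_true, List.foldl_map]
  · simp only [hf, if_false, List.foldl_nil]

theorem lsgB_events_eq (lines : List (List (Int × Int))) (starting_times : List (List Int))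
    (h : lines.length ≤ starting_times.length) :
    lsgB_events lines starting_times
      = (evA lines starting_times).map (fun p => (p.1, p.2.2)) := by
  unfold lsgB_events evA
  rw [zip_eq_range_map lines starting_times [] [] h, List.flatMap_map,
    List.map_flatMap, pyRange_zero_nat, List.flatMap_map]
  apply List.flatMap_congr
  intro k _
  rw [enumerate_eq_range_map _ ((0 : Int), (0 : Int)), List.flatMap_map,
    List.map_flatMap, pyRange_zero_nat, List.flatMap_map]
  apply List.flatMap_congr
  intro j _
  by_cases hf : (PySem.List.pyGetD (PySem.List.pyGetD lines (k : Int) []) (j : Int) (0, 0)).2 = 1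
  · simp only [hf, if_true, List.map_map]
    rfl
  · simp only [hf, if_false, List.map_nil]

-- adjacent-pairs index loop = zip with the tail
theorem wait_eq (lines : List (List (Int × Int))) (starting_times : List (List Int))
    (h : lines.length ≤ starting_times.length) :
    lsgA_wait (lsgA_H lines starting_times) = lsgB_wait (lsgB_events lines starting_times) := by
  have hH := lsgA_H_eq lines starting_times
  have hev := lsgB_events_eq lines starting_times h
  unfold lsgA_wait lsgB_wait
  have hkeys : (lsgA_H lines starting_times).keys
      = PySem.List.dedup ((lsgB_events lines starting_times).map (fun e => e.1)) := by
    rw [hH, PySem.Dict.keys_foldl_modify_key (evA lines starting_times) (fun p => p.1) []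
      (fun _ p b => b ++ [p.2]), hev, List.map_map]
    rfl
  rw [hkeys]
  apply PySem.List.foldl_congr_mem
  intro g u _
  have hbu : (lsgA_H lines starting_times).getD u []
      = ((evA lines starting_times).filter (fun p => p.1 == u)).map (fun p => p.2) := by
    rw [hH, PySem.Dict.getD_foldl_modify_append]
    simp
  have hts : PySem.List.sorted
        (((lsgB_events lines starting_times).filter (fun e => e.1 == u)).map (fun e => e.2)) (fun t => t)
      = (PySem.List.sorted ((lsgA_H lines starting_times).getD u []) (fun x => x.2)).map
          (fun x => x.2) := by
    rw [hev, List.filter_map, List.map_map]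
    have hb : ((evA lines starting_times).filter
          ((fun e => e.1 == u) ∘ (fun p => (p.1, p.2.2)))).map
            ((fun e => e.2) ∘ (fun p => (p.1, p.2.2)))
        = ((lsgA_H lines starting_times).getD u []).map (fun x => x.2) := by
      rw [hbu, List.map_map]
      rfl
    rw [hb, sorted_map_snd]
  rw [hts, PySem.List.slice_from _ (by norm_num : (0:Int) ≤ 1)]
  have ha := adj_foldl
    ((PySem.List.sorted ((lsgA_H lines starting_times).getD u []) (fun x => x.2)).map (fun x => x.2))
    (fun g t1 t2 => g.insert ((u, t1), (u, t2)) (t2 - t1)) g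
  simp only [List.length_map] at ha
  simp only [pyGetD_map_snd, Int.toNat_one]
  exact ha

-- A's while-loop computes B's chain-of-active-indices hops
theorem while_eq_chain (n : Nat) (line : List (Int × Int)) (st : Int) :
    ∀ (tail head : Int) (g : PySem.Dict ((Int × Int) × (Int × Int)) Int),
      ((line.length : Int) - head).toNat ≤ n →
      lsgA_while line st tail head g
        = (((tail :: (PySem.List.pyRange head (line.length : Int)).filter
              (fun j => (PySem.List.pyGetD line j (0, 0)).2 = 1))).zip
            ((PySem.List.pyRange head (line.length : Int)).filter
              (fun j => (PySem.List.pyGetD line j (0, 0)).2 = 1))).foldl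
            (fun g ab =>
              g.insert (((PySem.List.pyGetD line ab.1 (0, 0)).1, st + ab.1),
                        ((PySem.List.pyGetD line ab.2 (0, 0)).1, st + ab.2)) (ab.2 - ab.1)) g := by
  induction n with
  | zero =>
    intro tail head g hn
    have hge : ¬ head < (line.length : Int) := by omega
    rw [lsgA_while, dif_neg hge]
    have hr : PySem.List.pyRange head (line.length : Int) = [] := by
      rw [pyRange_one_eq]
      have : ((line.length : Int) - head).toNat = 0 := by omega
      simp [this]
    simp [hr]
  | succ n ih =>
    intro tail head g hn
    by_cases hh : head < (line.length : Int)
    · rw [lsgA_while, dif_pos hh, PySem.List.pyRange_one_cons hh]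
      by_cases hf : (PySem.List.pyGetD line head (0, 0)).2 = 1
      · simp only [hf, if_true, List.filter_cons, decide_true, List.zip_cons_cons,
          List.foldl_cons]
        have hw : (st + head) - (st + tail) = head - tail := by ring
        rw [hw]
        exact ih head (head + 1) _ (by omega)
      · simp only [hf, if_false, List.filter_cons, decide_false]
        exact ih tail (head + 1) g (by omega)
    · rw [lsgA_while, dif_neg hh]
      have hr : PySem.List.pyRange head (line.length : Int) = [] := by
        rw [pyRange_one_eq]
        have : ((line.length : Int) - head).toNat = 0 := by omega
        simp [this]
      simp [hr]

theorem travel_eq (lines : List (List (Int × Int))) (starting_times : List (List Int))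
    (h : lines.length ≤ starting_times.length)
    (g : PySem.Dict ((Int × Int) × (Int × Int)) Int) :
    lsgA_travel lines starting_times g = lsgB_travel lines starting_times g := by
  unfold lsgA_travel lsgB_travel
  rw [pyRange_zero_nat, List.foldl_map,
    zip_eq_range_map lines starting_times [] [] h, List.foldl_map]
  apply PySem.List.foldl_congr_mem
  intro g1 k _
  apply PySem.List.foldl_congr_mem
  intro g2 st _
  rw [while_eq_chain ((PySem.List.pyGetD lines (k : Int) []).length) _ st 0 1 g2 (by omega)]
  rw [PySem.List.slice_from _ (by norm_num : (0:Int) ≤ 1)]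
  rfl


-- ===== VERDICT (by name: the statement is the Claim_ definition above) =====
theorem load_state_graph_spec : Claim_equal_load_state_graph := by
  intro lines starting_times _hdom hpre
  unfold Spec_load_state_graph load_state_graph load_state_graph_alt
  rw [travel_eq lines starting_times hpre, wait_eq lines starting_times hpre]
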